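-- pv_equiv track=rewrite | github.com/PhilWa/precision-LLMs-for-bio-research | connect_openai/config_model.py | map_keywords_to_groups
-- ===== SOURCE A (Python) =====
-- def map_keywords_to_groups(keywords, groups):
--     mapped_groups = {}
--     for keyword in keywords:
--         for group_name, group in groups.items():
--             for subgroup_name, subgroup_keywords in group.items():
--                 if keyword in subgroup_keywords:
--                     if group_name not in mapped_groups:
--                         mapped_groups[group_name] = {}
--                     if subgroup_name not in mapped_groups[group_name]:
--                         mapped_groups[group_name][subgroup_name] = []
--                     mapped_groups[group_name][subgroup_name].append(keyword)
--     return mapped_groups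
-- ===== SOURCE B (Python) =====
-- def map_keywords_to_groups(keywords, groups):
--     # Inverted index: keyword -> list of (group, subgroup) pairs, built once.
--     index = {}
--     for group_name, group in groups.items():
--         for subgroup_name, subgroup_keywords in group.items():
--             for kw in dict.fromkeys(subgroup_keywords):
--                 index.setdefault(kw, []).append((group_name, subgroup_name))
--     mapped_groups = {}
--     for keyword in keywords:
--         for group_name, subgroup_name in index.get(keyword, []):
--             mapped_groups.setdefault(group_name, {}).setdefault(subgroup_name, []).append(keyword)
--     return mapped_groups
-- ===== Notes on version B (the rewrite author's own statement) =====
-- stated objective: faster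
-- what changed: Instead of scanning every subgroup keyword list for every keyword (K nested scans), B builds an inverted index keyword->(group,subgroup) pairs once and then does a single dict lookup per keyword.
import Mathlib
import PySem

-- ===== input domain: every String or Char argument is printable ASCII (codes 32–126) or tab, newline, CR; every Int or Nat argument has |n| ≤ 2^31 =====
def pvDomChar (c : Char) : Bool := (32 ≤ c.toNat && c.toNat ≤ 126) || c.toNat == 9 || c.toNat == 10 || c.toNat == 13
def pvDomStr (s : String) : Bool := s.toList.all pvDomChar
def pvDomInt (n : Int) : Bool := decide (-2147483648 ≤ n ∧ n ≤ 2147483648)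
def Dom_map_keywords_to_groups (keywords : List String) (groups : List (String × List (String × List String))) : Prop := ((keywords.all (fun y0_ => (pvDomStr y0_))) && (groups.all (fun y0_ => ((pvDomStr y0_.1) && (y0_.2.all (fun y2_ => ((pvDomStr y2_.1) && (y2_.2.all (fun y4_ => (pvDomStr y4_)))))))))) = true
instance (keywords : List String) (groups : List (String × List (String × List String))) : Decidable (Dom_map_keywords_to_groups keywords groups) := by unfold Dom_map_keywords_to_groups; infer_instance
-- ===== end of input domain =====

-- B replaces A's per-keyword rescan of every subgroup list by an inverted index
-- keyword → (group, subgroup) pairs built once; objective: faster (asymptotic).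

-- ===== PORT A =====
-- A's innermost if-body: the three mutation lines that record one (group, subgroup) hit.
def pvStepA (kw g s : String) (m : PySem.Dict String (PySem.Dict String (List String))) :
    PySem.Dict String (PySem.Dict String (List String)) :=
  let m1 := if m.contains g then m else m.insert g PySem.Dict.empty
  let inner := m1.getD g PySem.Dict.empty
  let inner1 := if inner.contains s then inner else inner.insert s ([] : List String)
  let inner2 := inner1.modify s [] (fun l => l ++ [kw])
  m1.insert g inner2

def map_keywords_to_groups (keywords : List String) (groups : List (String × List (String × List String))) : List (String × List (String × List String)) :=
  let mapped := keywords.foldl (fun m keyword =>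
    groups.foldl (fun m p =>
      p.2.foldl (fun m q =>
        if q.2.contains keyword then pvStepA keyword p.1 q.1 m else m) m) m)
    PySem.Dict.empty
  mapped.items.map (fun p => (p.1, p.2.items))

-- ===== PORT B =====
-- B's update: mapped.setdefault(g, {}).setdefault(s, []).append(kw), as a persistent rebuild.
def pvStepB (kw g s : String) (m : PySem.Dict String (PySem.Dict String (List String))) :
    PySem.Dict String (PySem.Dict String (List String)) :=
  let inner := m.getD g PySem.Dict.empty
  m.insert g (inner.insert s (inner.getD s [] ++ [kw]))

def map_keywords_to_groups_alt (keywords : List String) (groups : List (String × List (String × List String))) : List (String × List (String × List String)) :=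
  let index : PySem.Dict String (List (String × String)) :=
    groups.foldl (fun ix p =>
      p.2.foldl (fun ix q =>
        (PySem.List.dedup q.2).foldl (fun ix kw => ix.modify kw [] (fun l => l ++ [(p.1, q.1)])) ix) ix)
      PySem.Dict.empty
  let mapped := keywords.foldl (fun m keyword =>
    (index.getD keyword []).foldl (fun m gs => pvStepB keyword gs.1 gs.2 m) m)
    PySem.Dict.empty
  mapped.items.map (fun p => (p.1, p.2.items))

-- ===== PRECONDITION & SPEC =====
def Spec_map_keywords_to_groups (keywords : List String) (groups : List (String × List (String × List String))) (out : List (String × List (String × List String))) : Prop := out = map_keywords_to_groups_alt keywords groups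
instance (keywords : List String) (groups : List (String × List (String × List String))) (out : List (String × List (String × List String))) : Decidable (Spec_map_keywords_to_groups keywords groups out) := by unfold Spec_map_keywords_to_groups; infer_instance

-- ===== CLAIM (what is proved, stated in full; the proofs are below) =====
def Claim_equal_map_keywords_to_groups : Prop := ∀ (keywords : List String) (groups : List (String × List (String × List String))), Dom_map_keywords_to_groups keywords groups → Spec_map_keywords_to_groups keywords groups (map_keywords_to_groups keywords groups)

-- ===== LEMMAS AND PROOFS =====

-- modify with default is insert of the updated lookup
theorem pv_modify_eq_insert (d : PySem.Dict String (List String)) (k : String)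
    (f : List String → List String) :
    d.modify k [] f = d.insert k (f (d.getD k [])) := by
  simp [PySem.Dict.modify, PySem.Dict.insert, PySem.Dict.getD, PySem.Dict.get?]

-- A's update step and B's update step coincide
theorem pv_step_eq (kw g s : String) (m : PySem.Dict String (PySem.Dict String (List String))) :
    pvStepA kw g s m = pvStepB kw g s m := by
  unfold pvStepA pvStepB
  by_cases hg : m.contains g
  · simp only [hg, reduceIte]
    by_cases hs : (m.getD g PySem.Dict.empty).contains s
    · simp only [hs, reduceIte, pv_modify_eq_insert]
    · have hs0 : (m.getD g PySem.Dict.empty).contains s = false := by simpa using hs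
      simp only [hs0, Bool.false_eq_true, reduceIte, pv_modify_eq_insert,
        PySem.Dict.getD_insert_self, PySem.Dict.insert_insert_self,
        PySem.Dict.getD_of_not_contains _ _ hs0, List.nil_append]
  · have hg0 : m.contains g = false := by simpa using hg
    simp only [hg0, Bool.false_eq_true, reduceIte, PySem.Dict.getD_insert_self,
      PySem.Dict.contains_empty, pv_modify_eq_insert, PySem.Dict.getD_empty,
      PySem.Dict.insert_insert_self, PySem.Dict.getD_of_not_contains _ _ hg0,
      List.nil_append]

-- the (group, subgroup) hits of one keyword, in A's scan order
def pvHits (kw : String) (groups : List (String × List (String × List String))) : List (String × String) :=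
  groups.flatMap (fun p => p.2.filterMap (fun q => if q.2.contains kw then some (p.1, q.1) else none))

-- a Nodup list filtered for equality with kw
theorem pv_filter_nodup (l : List String) (kw : String) (h : l.Nodup) :
    l.filter (fun x => x == kw) = if kw ∈ l then [kw] else [] := by
  induction l with
  | nil => simp
  | cons x xs ih =>
    rcases List.nodup_cons.mp h with ⟨hx, hxs⟩
    by_cases hxe : x = kw
    · subst hxe
      simp [ih hxs, hx]
    · simp [hxe, ih hxs, Ne.symm hxe]

-- building the index over ONE subgroup appends its contribution to kw's entry
theorem pv_index_one (kw g s : String) (kws : List String)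
    (ix : PySem.Dict String (List (String × String))) :
    ((PySem.List.dedup kws).foldl (fun ix kw' => ix.modify kw' [] (fun l => l ++ [(g, s)])) ix).getD kw []
      = ix.getD kw [] ++ (if kws.contains kw then [(g, s)] else []) := by
  have h1 : (PySem.List.dedup kws).foldl (fun ix kw' => ix.modify kw' [] (fun l => l ++ [(g, s)])) ix
      = ((PySem.List.dedup kws).map (fun k => (k, (g, s)))).foldl (fun d p => d.modify p.1 [] (fun l => l ++ [p.2])) ix := by
    rw [List.foldl_map]
  rw [h1, PySem.Dict.getD_foldl_modify_append]
  congr 1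
  rw [List.filter_map]
  have h2 : ((PySem.List.dedup kws).filter (fun x => x == kw)) = if kw ∈ PySem.List.dedup kws then [kw] else [] :=
    pv_filter_nodup _ _ (PySem.List.nodup_dedup kws)
  simp only [Function.comp_def, h2]
  by_cases hm : kw ∈ kws
  · simp [hm]
  · simp [hm]

-- the whole index lists exactly the hits of each keyword, in scan order
theorem pv_index_getD (kw : String) (groups : List (String × List (String × List String)))
    (ix : PySem.Dict String (List (String × String))) :
    (groups.foldl (fun ix p =>
        p.2.foldl (fun ix q =>
          (PySem.List.dedup q.2).foldl (fun ix kw' => ix.modify kw' [] (fun l => l ++ [(p.1, q.1)])) ix) ix) ix).getD kw []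
      = ix.getD kw [] ++ pvHits kw groups := by
  induction groups generalizing ix with
  | nil => simp [pvHits]
  | cons p gs ih =>
    have hsub : ∀ (subs : List (String × List String)) (ix : PySem.Dict String (List (String × String))),
        (subs.foldl (fun ix q =>
          (PySem.List.dedup q.2).foldl (fun ix kw' => ix.modify kw' [] (fun l => l ++ [(p.1, q.1)])) ix) ix).getD kw []
        = ix.getD kw [] ++ subs.filterMap (fun q => if q.2.contains kw then some (p.1, q.1) else none) := by
      intro subs
      induction subs with
      | nil => simp
      | cons q qs ihq =>
        intro ix
        simp only [List.foldl_cons, List.filterMap_cons]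
        rw [ihq, pv_index_one]
        by_cases hc : kw ∈ q.2
        · simp [hc]
        · simp [hc]
    simp only [List.foldl_cons]
    rw [ih, hsub]
    simp only [pvHits, List.flatMap_cons, List.append_assoc]

-- A's scan of all groups for one keyword is a fold of pvStepA over that keyword's hits
theorem pv_scan_eq_hits (kw : String) (groups : List (String × List (String × List String)))
    (m : PySem.Dict String (PySem.Dict String (List String))) :
    groups.foldl (fun m p =>
        p.2.foldl (fun m q => if q.2.contains kw then pvStepA kw p.1 q.1 m else m) m) m
      = (pvHits kw groups).foldl (fun m gs => pvStepA kw gs.1 gs.2 m) m := by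
  induction groups generalizing m with
  | nil => simp [pvHits]
  | cons p gs ih =>
    have hsub : ∀ (subs : List (String × List String)) (m : PySem.Dict String (PySem.Dict String (List String))),
        subs.foldl (fun m q => if q.2.contains kw then pvStepA kw p.1 q.1 m else m) m
        = (subs.filterMap (fun q => if q.2.contains kw then some (p.1, q.1) else none)).foldl
            (fun m gs => pvStepA kw gs.1 gs.2 m) m := by
      intro subs
      induction subs with
      | nil => simp
      | cons q qs ihq =>
        intro m
        by_cases hc : q.2.contains kw
        · simp only [List.foldl_cons, List.filterMap_cons, hc, reduceIte]
          exact ihq _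
        · simp only [List.foldl_cons, List.filterMap_cons, hc, Bool.false_eq_true, reduceIte]
          exact ihq _
    simp only [List.foldl_cons]
    rw [hsub, ih]
    simp only [pvHits, List.flatMap_cons, List.foldl_append]

-- ===== VERDICT (by name: the statement is the Claim_ definition above) =====
theorem map_keywords_to_groups_spec : Claim_equal_map_keywords_to_groups := by
  intro keywords groups _
  unfold Spec_map_keywords_to_groups map_keywords_to_groups map_keywords_to_groups_alt
  have hfun : (fun (m : PySem.Dict String (PySem.Dict String (List String))) (keyword : String) =>
      groups.foldl (fun m p =>
        p.2.foldl (fun m q => if q.2.contains keyword then pvStepA keyword p.1 q.1 m else m) m) m)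
    = (fun m keyword =>
      ((groups.foldl (fun ix p =>
          p.2.foldl (fun ix q =>
            (PySem.List.dedup q.2).foldl (fun ix kw => ix.modify kw [] (fun l => l ++ [(p.1, q.1)])) ix) ix)
          PySem.Dict.empty).getD keyword []).foldl (fun m gs => pvStepB keyword gs.1 gs.2 m) m) := by
    funext m keyword
    rw [pv_scan_eq_hits, pv_index_getD, PySem.Dict.getD_empty]
    simp only [List.nil_append]
    exact PySem.List.foldl_congr_mem _ _ _ _ (fun acc gs _ => pv_step_eq keyword gs.1 gs.2 acc)
  rw [hfun]
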